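-- pv_equiv track=rewrite | github.com/eronekogin/leetcode | 2025/sliding_subarray_beauty.py | get_subarray_beauty
-- ===== SOURCE A (Python) =====
-- from collections import Counter
--
-- def get_subarray_beauty(nums: list[int], k: int, x: int) -> list[int]:
--     """
--     get subarray beauty
--     """
--     cnt = Counter()
--     rslt: list[int] = []
--     start = 0
--     for end, num in enumerate(nums):
--         if num < 0:
--             cnt[num] += 1
--
--         if end >= k - 1:
--             rank = 0
--             for y in sorted(cnt):
--                 rank += cnt[y]
--                 if rank >= x:
--                     rslt.append(y)
--                     break
--
--             if rank < x:
--                 rslt.append(0)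
--
--             if nums[start] < 0:
--                 cnt[nums[start]] -= 1
--
--             start += 1
--
--     return rslt
-- ===== SOURCE B (Python) =====
-- def get_subarray_beauty(nums: list[int], k: int, x: int) -> list[int]:
--     """
--     get subarray beauty
--     """
--     def beauty(window: list[int]) -> int:
--         negs = sorted(v for v in window if v < 0)
--         return negs[x - 1] if len(negs) >= x else 0
--
--     return [beauty(nums[i:i + k]) for i in range(len(nums) - k + 1)]
-- ===== Notes on version B (the rewrite author's own statement) =====
-- stated objective: simpler
-- what changed: B drops A's incrementally maintained Counter and rank scan over sorted distinct keys, and instead computes each window's beauty directly: slice the window, sort its negatives, and index the x-th one.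
-- outside the precondition, e.g. on get_subarray_beauty([1, -1], 0, 1): A returns [0, -1], B returns [0, 0, 0]; on get_subarray_beauty([-1, -2], 2, 0): A returns [-2], B returns [-1]
import Mathlib
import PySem

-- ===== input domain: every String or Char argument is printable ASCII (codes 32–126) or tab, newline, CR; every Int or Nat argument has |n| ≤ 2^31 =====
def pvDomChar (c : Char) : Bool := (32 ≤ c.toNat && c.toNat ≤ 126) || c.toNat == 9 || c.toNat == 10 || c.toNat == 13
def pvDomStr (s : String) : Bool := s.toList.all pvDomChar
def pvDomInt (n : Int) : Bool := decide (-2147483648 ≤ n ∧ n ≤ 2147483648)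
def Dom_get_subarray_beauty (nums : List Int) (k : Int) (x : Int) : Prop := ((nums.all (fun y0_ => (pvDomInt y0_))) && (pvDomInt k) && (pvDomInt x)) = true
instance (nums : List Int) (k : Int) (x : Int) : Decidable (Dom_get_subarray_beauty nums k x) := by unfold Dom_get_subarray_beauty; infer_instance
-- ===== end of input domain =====

-- B replaces A's incrementally maintained Counter + rank scan over the sorted distinct keys by a direct
-- per-window computation: slice the window, sort its negatives, index the x-th one (objective: simpler).

-- ===== PORT A =====
-- the inner 'for y in sorted(cnt): rank += cnt[y]; if rank >= x: … break' loop; returns (final rank, found key)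
def aSelect (ys : List Int) (cnt : PySem.Dict Int Int) (rank x : Int) : Int × Option Int :=
  match ys with
  | [] => (rank, none)
  | y :: t =>
    let r := rank + cnt.getD y 0
    if x ≤ r then (r, some y) else aSelect t cnt r x

-- one iteration of A's 'for end, num in enumerate(nums)' loop; state = (cnt, rslt, start)
def aStep (nums : List Int) (k x : Int) (s : PySem.Dict Int Int × List Int × Int) (p : Int × Int) :
    PySem.Dict Int Int × List Int × Int :=
  let cnt := if p.2 < 0 then s.1.modify p.2 0 (· + 1) else s.1
  if p.1 ≥ k - 1 then
    let sel := aSelect (PySem.List.sorted cnt.keys (fun y => y) false) cnt 0 x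
    let rslt := match sel.2 with | some y => s.2.1 ++ [y] | none => s.2.1
    let rslt := if sel.1 < x then rslt ++ [0] else rslt
    -- nums[start]: in range whenever this branch runs (start ≤ end < len); none is unreachable
    let cnt := match PySem.List.pyGet? nums s.2.2 with
               | some v => if v < 0 then cnt.modify v 0 (· - 1) else cnt
               | none => cnt
    (cnt, rslt, s.2.2 + 1)
  else (cnt, s.2.1, s.2.2)

def get_subarray_beauty (nums : List Int) (k : Int) (x : Int) : List Int :=
  ((PySem.List.enumerate nums 0).foldl (aStep nums k x) (PySem.Dict.empty, [], 0)).2.1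

-- ===== PORT B =====
-- negs = sorted(v for v in window if v < 0); negs[x-1] if len(negs) >= x else 0
def bBeauty (window : List Int) (x : Int) : Int :=
  let negs := PySem.List.sorted (window.filter (fun v => decide (v < 0))) (fun y => y) false
  if x ≤ (negs.length : Int) then (PySem.List.pyGet? negs (x - 1)).getD 0 else 0

def get_subarray_beauty_alt (nums : List Int) (k : Int) (x : Int) : List Int :=
  (PySem.List.pyRange 0 ((nums.length : Int) - k + 1) 1).map
    (fun i => bBeauty (PySem.List.slice nums (some i) (some (i + k))) x)

-- ===== PRECONDITION & SPEC =====
-- Pre_ restricts to the task's natural domain (window size and rank are positive counts): for k < 1 A slides a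
-- degenerate window and for x < 1 with a reachable window A's answer comes from stale zero-count Counter keys
-- (it can even drop windows), accidents outside the function's purpose that B does not reproduce; x < 1 is kept
-- when k exceeds the list length, where no window exists and both return [].
def Pre_get_subarray_beauty (nums : List Int) (k : Int) (x : Int) : Prop :=
  1 ≤ k ∧ (1 ≤ x ∨ (nums.length : Int) < k)
instance (nums : List Int) (k : Int) (x : Int) : Decidable (Pre_get_subarray_beauty nums k x) := by
  unfold Pre_get_subarray_beauty; infer_instance
def pvWitness_get_subarray_beauty : List Int × Int × Int := ([-1, 2, -3], 2, 1)
def Spec_get_subarray_beauty (nums : List Int) (k : Int) (x : Int) (out : List Int) : Prop := out = get_subarray_beauty_alt nums k x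
instance (nums : List Int) (k : Int) (x : Int) (out : List Int) : Decidable (Spec_get_subarray_beauty nums k x out) := by unfold Spec_get_subarray_beauty; infer_instance

-- ===== CLAIM (what is proved, stated in full; the proofs are below) =====
def Claim_equal_get_subarray_beauty : Prop := ∀ (nums : List Int) (k : Int) (x : Int), Dom_get_subarray_beauty nums k x → Pre_get_subarray_beauty nums k x → Spec_get_subarray_beauty nums k x (get_subarray_beauty nums k x)

-- ===== LEMMAS AND PROOFS =====

-- the multiset a counter snapshot stands for, read off along a key list
def keyExpand (ks : List Int) (cnt : PySem.Dict Int Int) : List Int :=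
  ks.flatMap (fun y => List.replicate (cnt.getD y 0).toNat y)

-- counter invariant: cnt holds exactly the multiplicities of the list N (keys may linger with count 0)
def InvC (cnt : PySem.Dict Int Int) (N : List Int) : Prop :=
  cnt.keys.Nodup ∧ ∀ y : Int, cnt.getD y 0 = (N.count y : Int)

lemma aSelect_found (ks : List Int) (cnt : PySem.Dict Int Int) :
    ∀ (rank x : Int), (∀ y ∈ ks, 0 ≤ cnt.getD y 0) → rank < x →
      x ≤ rank + (keyExpand ks cnt).length →
      x ≤ (aSelect ks cnt rank x).1 ∧
        (aSelect ks cnt rank x).2 = (keyExpand ks cnt)[(x - rank - 1).toNat]? := by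
  induction ks with
  | nil => intro rank x _ hlt hle; simp [keyExpand] at hle; omega
  | cons y t ih =>
    intro rank x h hlt hle
    have hy : 0 ≤ cnt.getD y 0 := h y (by simp)
    have hlen : (keyExpand (y :: t) cnt).length
        = (cnt.getD y 0).toNat + (keyExpand t cnt).length := by
      simp [keyExpand]
    by_cases hcross : x ≤ rank + cnt.getD y 0
    · refine ⟨by simp [aSelect, hcross], ?_⟩
      simp only [aSelect, if_pos hcross]
      rw [show keyExpand (y :: t) cnt
            = List.replicate (cnt.getD y 0).toNat y ++ keyExpand t cnt by simp [keyExpand]]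
      rw [List.getElem?_append_left (by simp; omega)]
      simp [List.getElem?_replicate]
      omega
    · have ht := ih (rank + cnt.getD y 0) x (fun z hz => h z (by simp [hz]))
        (by omega) (by omega)
      refine ⟨by simpa [aSelect, hcross] using ht.1, ?_⟩
      simp only [aSelect, if_neg hcross]
      rw [ht.2]
      rw [show keyExpand (y :: t) cnt
            = List.replicate (cnt.getD y 0).toNat y ++ keyExpand t cnt by simp [keyExpand]]
      rw [List.getElem?_append_right (by simp; omega)]
      congr 1
      simp
      omega

lemma aSelect_none (ks : List Int) (cnt : PySem.Dict Int Int) :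
    ∀ (rank x : Int), (∀ y ∈ ks, 0 ≤ cnt.getD y 0) →
      rank + (keyExpand ks cnt).length < x →
      aSelect ks cnt rank x = (rank + (keyExpand ks cnt).length, none) := by
  induction ks with
  | nil => intro rank x _ _; simp [aSelect, keyExpand]
  | cons y t ih =>
    intro rank x h hlt
    have hy : 0 ≤ cnt.getD y 0 := h y (by simp)
    have hlen : (keyExpand (y :: t) cnt).length
        = (cnt.getD y 0).toNat + (keyExpand t cnt).length := by simp [keyExpand]
    have hcross : ¬ x ≤ rank + cnt.getD y 0 := by omega
    rw [show aSelect (y :: t) cnt rank x = aSelect t cnt (rank + cnt.getD y 0) x by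
          simp [aSelect, hcross]]
    rw [ih (rank + cnt.getD y 0) x (fun z hz => h z (by simp [hz])) (by omega)]
    rw [Prod.mk.injEq]
    exact ⟨by omega, rfl⟩

lemma count_keyExpand (ks : List Int) (cnt : PySem.Dict Int Int) (z : Int) (hnd : ks.Nodup) :
    (keyExpand ks cnt).count z = if z ∈ ks then (cnt.getD z 0).toNat else 0 := by
  induction ks with
  | nil => simp [keyExpand]
  | cons y t ih =>
    rw [show keyExpand (y :: t) cnt
          = List.replicate (cnt.getD y 0).toNat y ++ keyExpand t cnt by simp [keyExpand]]
    rw [List.count_append, List.count_replicate, ih (List.Nodup.of_cons hnd)]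
    have hyt : y ∉ t := (List.nodup_cons.mp hnd).1
    by_cases hzy : z = y
    · subst hzy; simp [hyt]
    · simp [hzy, Ne.symm hzy, List.mem_cons]

lemma pairwise_keyExpand (ks : List Int) (cnt : PySem.Dict Int Int)
    (h : ks.Pairwise (· ≤ ·)) : (keyExpand ks cnt).Pairwise (· ≤ ·) := by
  induction ks with
  | nil => simp [keyExpand]
  | cons y t ih =>
    rw [show keyExpand (y :: t) cnt
          = List.replicate (cnt.getD y 0).toNat y ++ keyExpand t cnt by simp [keyExpand]]
    rcases List.pairwise_cons.mp h with ⟨hy, ht⟩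
    refine List.pairwise_append.mpr ⟨List.pairwise_replicate_of_refl, ih ht, ?_⟩
    intro a ha b hb
    rcases List.mem_flatMap.mp hb with ⟨y', hy't, hb'⟩
    rw [List.eq_of_mem_replicate ha, List.eq_of_mem_replicate hb']
    exact hy y' hy't

-- the expansion of the sorted key list is sorted(N)
lemma keyExpand_sorted_keys (cnt : PySem.Dict Int Int) (N : List Int) (hInv : InvC cnt N) :
    PySem.List.sorted N (fun y => y) false
      = keyExpand (PySem.List.sorted cnt.keys (fun y => y) false) cnt := by
  have hnd : (PySem.List.sorted cnt.keys (fun y => y) false).Nodup :=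
    ((PySem.List.sorted_perm cnt.keys _ false).nodup_iff).mpr hInv.1
  apply PySem.List.sorted_id_eq_of_perm_of_pairwise
  · apply List.perm_iff_count.mpr
    intro z
    rw [count_keyExpand _ _ _ hnd]
    by_cases hz : z ∈ cnt.keys
    · rw [if_pos ((PySem.List.mem_sorted _ _ _ _).mpr hz), hInv.2 z]
      simp
    · rw [if_neg (fun hc => hz ((PySem.List.mem_sorted _ _ _ _).mp hc))]
      have h0 : cnt.getD z 0 = 0 := by
        apply PySem.Dict.getD_of_not_contains
        rw [PySem.Dict.contains_eq_decide_mem_keys]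
        simpa using hz
      have := hInv.2 z
      omega
  · exact pairwise_keyExpand _ _ (PySem.List.sorted_pairwise _ _)

-- what one window's select-and-append block produces: exactly [bBeauty window x]
lemma select_window (cnt : PySem.Dict Int Int) (window : List Int) (x : Int) (hx : 1 ≤ x)
    (hInv : InvC cnt (window.filter (fun v => decide (v < 0)))) :
    (let sel := aSelect (PySem.List.sorted cnt.keys (fun y => y) false) cnt 0 x
     (match sel.2 with | some y => [y] | none => ([] : List Int)) ++
       (if sel.1 < x then [0] else [])) = [bBeauty window x] := by
  have hnn : ∀ y ∈ PySem.List.sorted cnt.keys (fun y => y) false, 0 ≤ cnt.getD y 0 := by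
    intro y _; rw [hInv.2 y]; exact Int.natCast_nonneg _
  have hexp := keyExpand_sorted_keys cnt _ hInv
  by_cases hcase :
      x ≤ ((keyExpand (PySem.List.sorted cnt.keys (fun y => y) false) cnt).length : Int)
  · obtain ⟨h1, h2⟩ := aSelect_found _ cnt 0 x hnn (by omega) (by omega)
    have e0 : x - 0 - 1 = x - 1 := by ring
    rw [e0] at h2
    have hidx : (x - 1).toNat
        < (keyExpand (PySem.List.sorted cnt.keys (fun y => y) false) cnt).length := by omega
    rw [List.getElem?_eq_getElem hidx] at h2
    simp only [h2, if_neg (by omega : ¬ (aSelect (PySem.List.sorted cnt.keys (fun y => y) false) cnt 0 x).1 < x)]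
    simp only [bBeauty, hexp]
    rw [if_pos hcase, PySem.List.pyGet?_of_nonneg _ (show (0:Int) ≤ x - 1 by omega), List.getElem?_eq_getElem hidx]
    simp
  · rw [aSelect_none _ cnt 0 x hnn (by omega)]
    simp only [if_pos (by omega :
      (0 : Int) + ((keyExpand (PySem.List.sorted cnt.keys (fun y => y) false) cnt).length : Int) < x)]
    simp only [bBeauty, hexp]
    rw [if_neg hcase]
    rfl


lemma nodup_keys_modify (d : PySem.Dict Int Int) (k : Int) (d0 : Int) (f : Int → Int)
    (h : d.keys.Nodup) : (d.modify k d0 f).keys.Nodup := by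
  rw [PySem.Dict.keys_modify]
  exact PySem.Dict.nodup_keys_insert _ _ _ h

-- pushing an element into the window keeps the counter invariant
lemma InvC_push (cnt : PySem.Dict Int Int) (W : List Int) (a : Int)
    (h : InvC cnt (W.filter (fun v => decide (v < 0)))) :
    InvC (if a < 0 then cnt.modify a 0 (· + 1) else cnt)
      ((W ++ [a]).filter (fun v => decide (v < 0))) := by
  rcases h with ⟨hnd, hcount⟩
  by_cases ha : a < 0
  · refine ⟨by rw [if_pos ha]; exact nodup_keys_modify _ _ _ _ hnd, ?_⟩
    intro y
    have hfa : List.filter (fun v => decide (v < 0)) [a] = [a] := by simp [ha]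
    rw [if_pos ha, PySem.Dict.getD_modify, List.filter_append, hfa, List.count_append]
    by_cases hya : y = a
    · subst hya
      rw [if_pos rfl, hcount y]
      simp
    · rw [if_neg hya, hcount y]
      have h0 : List.count y [a] = 0 := by rw [List.count_singleton]; simp [Ne.symm hya]
      rw [h0]
      omega
  · refine ⟨by rw [if_neg ha]; exact hnd, ?_⟩
    intro y
    have hfa : List.filter (fun v => decide (v < 0)) [a] = [] := by simp [ha]
    rw [if_neg ha, List.filter_append, hfa, List.append_nil]
    exact hcount y

-- dropping the front element of the window keeps the counter invariant
lemma InvC_pop (cnt : PySem.Dict Int Int) (W : List Int) (a : Int)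
    (h : InvC cnt ((a :: W).filter (fun v => decide (v < 0)))) :
    InvC (if a < 0 then cnt.modify a 0 (· - 1) else cnt)
      (W.filter (fun v => decide (v < 0))) := by
  rcases h with ⟨hnd, hcount⟩
  by_cases ha : a < 0
  · refine ⟨by rw [if_pos ha]; exact nodup_keys_modify _ _ _ _ hnd, ?_⟩
    intro y
    have hthis := hcount y
    rw [List.filter_cons, if_pos (by simpa using ha)] at hthis
    rw [if_pos ha, PySem.Dict.getD_modify]
    by_cases hya : y = a
    · subst hya
      rw [List.count_cons_self] at hthis
      rw [if_pos rfl, hthis]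
      push_cast
      ring
    · rw [List.count_cons] at hthis
      simp [Ne.symm hya] at hthis
      rw [if_neg hya, hthis]
  · refine ⟨by rw [if_neg ha]; exact hnd, ?_⟩
    intro y
    have hthis := hcount y
    rw [List.filter_cons, if_neg (by simpa using ha)] at hthis
    rw [if_neg ha, hthis]

-- B's answer list after the first e windows
def Rres (nums : List Int) (k x : Int) (e : Int) : List Int :=
  (PySem.List.pyRange 0 (e - k + 1) 1).map
    (fun i => bBeauty (PySem.List.slice nums (some i) (some (i + k))) x)

-- with no full window (k > len(nums)) A's loop never reaches the append branch
lemma fold_no_window (nums : List Int) (k x : Int) :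
    ∀ (ps : List (Int × Int)) (c : PySem.Dict Int Int) (R : List Int) (st : Int),
      (∀ p ∈ ps, ¬ p.1 ≥ k - 1) →
      (ps.foldl (aStep nums k x) (c, R, st)).2.1 = R := by
  intro ps
  induction ps with
  | nil => intro c R st _; rfl
  | cons p t ih =>
    intro c R st h
    rw [List.foldl_cons]
    rw [show aStep nums k x (c, R, st) p
          = (if p.2 < 0 then c.modify p.2 0 (· + 1) else c, R, st) by
        simp [aStep, h p (by simp)]]
    exact ih _ R st (fun q hq => h q (by simp [hq]))

lemma fold_inv (nums : List Int) (k x : Int) (hk : 1 ≤ k) (hx : 1 ≤ x) :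
    ∀ e : Nat, e ≤ nums.length →
      ∃ cnt : PySem.Dict Int Int,
        ((PySem.List.enumerate nums 0).take e).foldl (aStep nums k x) (PySem.Dict.empty, [], 0)
          = (cnt, Rres nums k x (e : Int), ((e - (k.toNat - 1) : Nat) : Int))
        ∧ InvC cnt (((nums.take e).drop (e - (k.toNat - 1))).filter (fun v => decide (v < 0))) := by
  have hk' : ((k.toNat : Int)) = k := Int.toNat_of_nonneg (by omega)
  intro e
  induction e with
  | zero =>
    intro _
    refine ⟨PySem.Dict.empty, ?_, ?_⟩
    · simp [Rres]
      exact PySem.List.pyRange_one_eq_nil (by omega)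
    · exact ⟨PySem.Dict.nodup_keys_empty, fun y => by simp [PySem.Dict.getD_empty]⟩
  | succ e ih =>
    intro he1
    have he : e < nums.length := by omega
    obtain ⟨cnt, hfold, hInv⟩ := ih (by omega)
    have htake : (PySem.List.enumerate nums 0).take (e + 1)
        = (PySem.List.enumerate nums 0).take e ++ [((e : Int), nums[e])] := by
      rw [List.take_add_one, PySem.List.getElem?_enumerate, List.getElem?_eq_getElem he]
      simp
    rw [htake, List.foldl_append, hfold]
    simp only [List.foldl_cons, List.foldl_nil]
    -- window gained nums[e] at the back
    have hW1 : (nums.take (e + 1)).drop (e - (k.toNat - 1))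
        = (nums.take e).drop (e - (k.toNat - 1)) ++ [nums[e]] := by
      have hlen : e - (k.toNat - 1) ≤ (List.take e nums).length := by
        rw [List.length_take]
        omega
      rw [List.take_add_one, List.getElem?_eq_getElem he, Option.toList_some,
        List.drop_append_of_le_length hlen]
    have hInv1 := InvC_push cnt _ nums[e] hInv
    rw [← hW1] at hInv1
    by_cases hbr : (e : Int) ≥ k - 1
    case neg =>
      -- window not yet full: nothing is appended, start stays 0
      have h0 : e - (k.toNat - 1) = 0 := by omega
      have h1 : e + 1 - (k.toNat - 1) = 0 := by omega
      refine ⟨if nums[e] < 0 then cnt.modify nums[e] 0 (· + 1) else cnt, ?_, ?_⟩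
      · simp only [aStep, if_neg hbr]
        have hR : Rres nums k x ((e : Int) + 1) = Rres nums k x (e : Int) := by
          rw [show Rres nums k x ((e : Int) + 1)
                = (PySem.List.pyRange 0 ((e : Int) + 1 - k + 1) 1).map _ from rfl]
          rw [PySem.List.pyRange_one_eq_nil (by omega), Rres,
            PySem.List.pyRange_one_eq_nil (by omega)]
        rw [h0, h1] at *
        simp only [Nat.cast_zero]
        rw [show ((e : Nat) + 1 : Nat) = e + 1 from rfl]
        push_cast
        rw [hR]
      · rw [h1, ← h0]
        exact hInv1
    case pos =>
      have hs : e - (k.toNat - 1) < nums.length := by omega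
      rcases haS : aSelect (PySem.List.sorted (if nums[e] < 0 then cnt.modify nums[e] 0 (· + 1) else cnt).keys (fun y => y) false) (if nums[e] < 0 then cnt.modify nums[e] 0 (· + 1) else cnt) 0 x with ⟨r, yopt⟩
      have hsel := select_window (if nums[e] < 0 then cnt.modify nums[e] 0 (· + 1) else cnt)
        ((nums.take (e + 1)).drop (e - (k.toNat - 1))) x hx hInv1
      rw [haS] at hsel
      have hsel' : ((match yopt with | some y => [y] | none => ([] : List Int)) ++
          if r < x then [0] else [])
          = [bBeauty ((nums.take (e + 1)).drop (e - (k.toNat - 1))) x] := hsel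
      -- B's list gains exactly this window's beauty
      have hRres : Rres nums k x ((e + 1 : Nat) : Int)
          = Rres nums k x (e : Int)
            ++ [bBeauty ((nums.take (e + 1)).drop (e - (k.toNat - 1))) x] := by
        have hcast : ((e + 1 : Nat) : Int) = (e : Int) + 1 := by push_cast; ring
        rw [hcast]
        show (PySem.List.pyRange 0 ((e : Int) + 1 - k + 1) 1).map _ = _
        rw [show (e : Int) + 1 - k + 1 = ((e : Int) - k + 1) + 1 by ring,
          PySem.List.pyRange_one_succ_right (by omega), List.map_append]
        congr 1
        rw [List.map_singleton]
        congr 1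
        rw [show (e : Int) - k + 1 = ((e - (k.toNat - 1) : Nat) : Int) by omega]
        rw [show ((e - (k.toNat - 1) : Nat) : Int) + k = ((e + 1 : Nat) : Int) by push_cast; omega]
        rw [PySem.List.slice_natCast, List.drop_take]
      -- the counter after evicting nums[start]
      have hcons : (nums.take (e + 1)).drop (e - (k.toNat - 1))
          = nums[e - (k.toNat - 1)] :: (nums.take (e + 1)).drop ((e - (k.toNat - 1)) + 1) := by
        rw [List.drop_eq_getElem_cons (by rw [List.length_take]; omega)]
        congr 1
        exact List.getElem_take
      rw [hcons] at hInv1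
      have hInv2 := InvC_pop _ _ _ hInv1
      have hidx2 : e + 1 - (k.toNat - 1) = (e - (k.toNat - 1)) + 1 := by omega
      simp only [aStep, if_pos hbr]
      rw [haS, PySem.List.pyGet?_natCast, List.getElem?_eq_getElem hs]
      have hr : (if (r, yopt).1 < x then
            (match (r, yopt).2 with
              | some y => Rres nums k x (e : Int) ++ [y]
              | none => Rres nums k x (e : Int)) ++ [0]
          else
            match (r, yopt).2 with
            | some y => Rres nums k x (e : Int) ++ [y]
            | none => Rres nums k x (e : Int))
          = Rres nums k x (e : Int)
            ++ ((match yopt with | some y => [y] | none => ([] : List Int)) ++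
                if r < x then [0] else []) := by
        cases yopt <;> by_cases hrx : r < x <;> simp [hrx]
      rw [hr, hsel']
      refine ⟨if nums[e - (k.toNat - 1)] < 0
          then (if nums[e] < 0 then cnt.modify nums[e] 0 (· + 1) else cnt).modify
            (nums[e - (k.toNat - 1)]) 0 (· - 1)
          else (if nums[e] < 0 then cnt.modify nums[e] 0 (· + 1) else cnt), ?_, ?_⟩
      · simp only [Prod.mk.injEq]
        refine ⟨trivial, hRres.symm, ?_⟩
        omega

      · rw [hidx2]
        exact hInv2

theorem get_subarray_beauty_spec : Claim_equal_get_subarray_beauty := by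
  intro nums k x _ hpre
  unfold Pre_get_subarray_beauty at hpre
  obtain ⟨hk, hx⟩ := hpre
  unfold Spec_get_subarray_beauty
  by_cases hx1 : 1 ≤ x
  · obtain ⟨cnt, hfold, -⟩ := fold_inv nums k x hk hx1 nums.length le_rfl
    unfold get_subarray_beauty
    rw [show PySem.List.enumerate nums 0 = (PySem.List.enumerate nums 0).take nums.length from
      (List.take_of_length_le (by rw [PySem.List.length_enumerate])).symm]
    rw [hfold]
    rfl
  · -- x < 1, hence k > len(nums): no window is ever full and both sides return []
    have hkn : (nums.length : Int) < k := by tauto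
    unfold get_subarray_beauty
    rw [fold_no_window nums k x _ _ _ _ ?_]
    · unfold get_subarray_beauty_alt
      rw [PySem.List.pyRange_one_eq_nil (by omega)]
      rfl
    · intro p hp
      rcases (PySem.List.mem_enumerate_iff _ _ _).mp hp with ⟨j, hj, rfl⟩
      simp only []
      omega
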